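-- pv_equiv track=rewrite | github.com/armandue/hook | largest_lost/main.py | calculate_largest_lost
-- ===== SOURCE A (Python) =====
-- def calculate_largest_lost(prices: []):
--     buy = len(prices) - 2
--     sell = len(prices) - 1
--     largest_lost = None
--     while buy >= 0:
--         gap = prices[sell] - prices[buy]
--         if gap <= 0:
--             if largest_lost is None:
--                 largest_lost = gap
--             else:
--                 largest_lost = min(largest_lost, gap)
--         else:
--             sell = buy
--         buy -= 1
--     return largest_lost
-- ===== SOURCE B (Python) =====
-- def calculate_largest_lost(prices: []):
--     # Two-pass re-implementation: materialize the suffix-minimum array (as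
--     # prefix-mins of the reversed list), then take the min gap in a second pass.
--     if len(prices) < 2:
--         return None
--     rp = prices[::-1]
--     smin = []  # smin[j] = min(rp[:j+1]) = min of the last j+1 prices
--     for p in rp:
--         smin.append(p if not smin else min(smin[-1], p))
--     m = min(s - p for p, s in zip(rp[1:], smin))
--     return m if m <= 0 else None
-- ===== Notes on version B (the rewrite author's own statement) =====
-- stated objective: alternative
-- what changed: Replaces A's single backward while-loop that tracks a 'sell' index and accumulates the min only over non-positive gaps with a two-pass scheme: first materialize the suffix-minimum array (built as prefix-mins of the reversed list), then take the minimum of all gaps in a separate zip pass and return it only if it is non-positive.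
import Mathlib
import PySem

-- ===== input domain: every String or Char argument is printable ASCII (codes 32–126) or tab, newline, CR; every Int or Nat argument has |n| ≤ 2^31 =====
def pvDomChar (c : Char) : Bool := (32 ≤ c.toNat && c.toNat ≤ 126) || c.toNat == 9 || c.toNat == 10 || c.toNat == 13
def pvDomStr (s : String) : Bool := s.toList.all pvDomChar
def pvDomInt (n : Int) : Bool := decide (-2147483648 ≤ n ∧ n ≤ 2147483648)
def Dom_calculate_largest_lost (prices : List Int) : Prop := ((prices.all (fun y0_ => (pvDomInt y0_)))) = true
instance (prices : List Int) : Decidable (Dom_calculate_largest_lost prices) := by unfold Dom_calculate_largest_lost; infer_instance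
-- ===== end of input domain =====

-- B replaces A's single backward scan (sell-index + running min of non-positive gaps) by a
-- two-pass scheme: materialize the suffix-minimum array, then take the min gap in a second pass
-- (alternative decomposition, same O(n) cost).


-- ===== PORT A =====
-- 'largest_lost = gap if largest_lost is None else min(largest_lost, gap)'
def pvUpdMin (ll : Option Int) (gap : Int) : Option Int :=
  match ll with
  | none => some gap
  | some l => some (min l gap)

-- the while-loop of A; prices[sell]/prices[buy] are always in range on reachable states
def pvALoop (prices : List Int) (buy sell : Int) (ll : Option Int) : Option Int :=
  if _h : 0 ≤ buy then
    let gap := PySem.List.pyGetD prices sell 0 - PySem.List.pyGetD prices buy 0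
    if gap ≤ 0 then pvALoop prices (buy - 1) sell (pvUpdMin ll gap)
    else pvALoop prices (buy - 1) buy ll
  else ll
termination_by (buy + 1).toNat
decreasing_by all_goals omega

def calculate_largest_lost (prices : List Int) : Option Int :=
  pvALoop prices (PySem.List.len prices - 2) (PySem.List.len prices - 1) none

-- ===== PORT B =====
-- 'smin.append(p if not smin else min(smin[-1], p))'
def pvBStep (acc : List Int) (p : Int) : List Int :=
  acc ++ [if acc.isEmpty then p else min (PySem.List.pyGetD acc (-1) 0) p]

def calculate_largest_lost_alt (prices : List Int) : Option Int :=
  if PySem.List.len prices < 2 then none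
  else
    let rp := prices.reverse      -- prices[::-1]  (PySem.List.slice?_none_none_neg_one)
    let smin := rp.foldl pvBStep []
    let gaps := (List.zip rp.tail smin).map (fun pr => pr.2 - pr.1)   -- rp[1:] is rp.tail (slice_from_one)
    match PySem.List.min? gaps (fun x => x) with
    | some m => if m ≤ 0 then some m else none
    | none => none                -- unreachable: len(prices) ≥ 2, so gaps is nonempty

-- ===== PRECONDITION & SPEC =====
def Spec_calculate_largest_lost (prices : List Int) (out : Option Int) : Prop := out = calculate_largest_lost_alt prices
instance (prices : List Int) (out : Option Int) : Decidable (Spec_calculate_largest_lost prices out) := by unfold Spec_calculate_largest_lost; infer_instance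

-- ===== CLAIM (what is proved, stated in full; the proofs are below) =====
def Claim_equal_calculate_largest_lost : Prop := ∀ (prices : List Int), Dom_calculate_largest_lost prices → Spec_calculate_largest_lost prices (calculate_largest_lost prices)

-- ===== LEMMAS AND PROOFS =====

-- min(prices[i:]) for successive i, as prefix-mins seeded with m
def pvScanMin (m : Int) : List Int → List Int
  | [] => []
  | q :: l => min m q :: pvScanMin (min m q) l

-- the gap list both programs are about
def pvGaps (m : Int) (l : List Int) : List Int :=
  (List.zip l (m :: pvScanMin m l)).map (fun pr => pr.2 - pr.1)

-- A's accumulation over a ready-made gap list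
def pvF (ll : Option Int) : List Int → Option Int
  | [] => ll
  | g :: gs => pvF (if g ≤ 0 then pvUpdMin ll g else ll) gs

-- A's loop after the indices are gone: running suffix-min m, elements right-to-left
def pvFoldAux (m : Int) (ll : Option Int) : List Int → Option Int
  | [] => ll
  | q :: l => if m - q ≤ 0 then pvFoldAux m (pvUpdMin ll (m - q)) l else pvFoldAux q ll l

def pvToRes (a : Int) : Option Int := if a ≤ 0 then some a else none

theorem pvGaps_cons (m q : Int) (l : List Int) :
    pvGaps m (q :: l) = (m - q) :: pvGaps (min m q) l := by
  simp [pvGaps, pvScanMin]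

theorem pvFoldAux_eq_pvF (l : List Int) : ∀ (m : Int) (ll : Option Int),
    pvFoldAux m ll l = pvF ll (pvGaps m l) := by
  induction l with
  | nil => intro m ll; simp [pvFoldAux, pvGaps, pvScanMin, pvF]
  | cons q l ih =>
    intro m ll
    rw [pvGaps_cons]
    by_cases h : m - q ≤ 0
    · have hm : min m q = m := min_eq_left (by omega)
      simp [pvFoldAux, pvF, h, hm, ih]
    · have hm : min m q = q := min_eq_right (by omega)
      simp [pvFoldAux, pvF, h, hm, ih]

theorem pvToRes_step (a q : Int) :
    pvToRes (min a q) = if q ≤ 0 then pvUpdMin (pvToRes a) q else pvToRes a := by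
  unfold pvToRes pvUpdMin
  by_cases ha : a ≤ 0 <;> by_cases hq : q ≤ 0 <;>
    simp [min_def, ha, hq] <;> split_ifs <;> simp_all <;> omega

theorem pvF_toRes (t : List Int) : ∀ (a : Int),
    pvToRes (t.foldl min a) = pvF (pvToRes a) t := by
  induction t with
  | nil => intro a; rfl
  | cons q t ih =>
    intro a
    have : pvF (pvToRes a) (q :: t) = pvF (if q ≤ 0 then pvUpdMin (pvToRes a) q else pvToRes a) t := rfl
    rw [this, ← pvToRes_step, List.foldl_cons, ih]

theorem pvF_none_eq_min? (gs : List Int) :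
    pvF none gs =
      (match PySem.List.min? gs (fun x => x) with
       | some m => if m ≤ 0 then some m else none
       | none => none) := by
  cases gs with
  | nil => simp [pvF, PySem.List.min?]
  | cons g t =>
    rw [PySem.List.min?_id_cons]
    have h1 : (if g ≤ 0 then some g else none : Option Int) = pvToRes g := rfl
    have h2 : pvF none (g :: t) = pvF (if g ≤ 0 then pvUpdMin none g else none) t := rfl
    simp only [h2, pvUpdMin, h1, ← pvF_toRes]
    rfl

theorem pvBStep_fold (l : List Int) : ∀ (acc : List Int) (m : Int),
    acc ≠ [] → PySem.List.pyGetD acc (-1) 0 = m →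
    l.foldl pvBStep acc = acc ++ pvScanMin m l := by
  induction l with
  | nil => intro acc m _ _; simp [pvScanMin]
  | cons q l ih =>
    intro acc m hne hlast
    have hstep : pvBStep acc q = acc ++ [min m q] := by
      simp [pvBStep, List.isEmpty_iff, hne, hlast]
    rw [List.foldl_cons, hstep,
        ih (acc ++ [min m q]) (min m q) (by simp)
          (PySem.List.pyGetD_neg_one_append_singleton acc (min m q) 0)]
    simp [pvScanMin]

theorem pvALoop_eq (p : List Int) : ∀ (k : Nat) (s : Int) (ll : Option Int),
    k ≤ p.length → 0 ≤ s → s < p.length →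
    pvALoop p ((k : Int) - 1) s ll = pvFoldAux (p.getD s.toNat 0) ll ((p.take k).reverse) := by
  intro k
  induction k with
  | zero =>
    intro s ll _ _ _
    rw [pvALoop]
    simp [pvFoldAux]
  | succ k ih =>
    intro s ll hk hs hslt
    have hklt : k < p.length := by omega
    have hbuy : ((k + 1 : Nat) : Int) - 1 = ((k : Nat) : Int) := by push_cast; omega
    rw [hbuy, pvALoop]
    have h0 : (0 : Int) ≤ (k : Int) := by positivity
    rw [dif_pos h0]
    have hgbuy : PySem.List.pyGetD p ((k : Nat) : Int) 0 = p.getD k 0 := by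
      simp [PySem.List.pyGetD_natCast]
    have hgsell : PySem.List.pyGetD p s 0 = p.getD s.toNat 0 := by
      rw [PySem.List.pyGetD_eq_getElem p 0 hs hslt, List.getD_eq_getElem _ _ (by omega)]
    have htake : (p.take (k + 1)).reverse = p.getD k 0 :: (p.take k).reverse := by
      rw [List.take_add_one]
      simp [List.getElem?_eq_getElem hklt]
    rw [htake]
    simp only [hgbuy, hgsell, pvFoldAux]
    by_cases hgap : p.getD s.toNat 0 - p.getD k 0 ≤ 0
    · rw [if_pos hgap, if_pos hgap]
      have : ((k : Nat) : Int) - 1 = ((k : Nat) : Int) - 1 := rfl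
      rw [ih s (pvUpdMin ll (p.getD s.toNat 0 - p.getD k 0)) (by omega) hs hslt]
    · rw [if_neg hgap, if_neg hgap]
      rw [ih ((k : Nat) : Int) ll (by omega) h0 (by exact_mod_cast hklt)]
      simp

-- ===== VERDICT (by name: the statement is the Claim_ definition above) =====
theorem calculate_largest_lost_spec : Claim_equal_calculate_largest_lost := by
  intro prices _
  unfold Spec_calculate_largest_lost calculate_largest_lost calculate_largest_lost_alt
  by_cases hn : prices.length < 2
  · rw [pvALoop]
    have : ¬ (0 : Int) ≤ PySem.List.len prices - 2 := by
      simp [PySem.List.len_eq]; omega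
    rw [dif_neg this, if_pos (by simp [PySem.List.len_eq]; omega)]
  · -- n ≥ 2
    have hn2 : 2 ≤ prices.length := by omega
    rw [if_neg (by simp [PySem.List.len_eq]; omega)]
    -- decompose the reversed list
    cases hrev : prices.reverse with
    | nil =>
      exfalso
      have h0 : prices.reverse.length = 0 := by rw [hrev]; rfl
      rw [List.length_reverse] at h0
      omega
    | cons r0 rs =>
      have hp : prices = rs.reverse ++ [r0] := by
        have := congrArg List.reverse hrev
        simpa using this
      have hlen : prices.length = rs.length + 1 := by
        have := congrArg List.length hrev; simpa using this
      -- A side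
      have hA : pvALoop prices (PySem.List.len prices - 2) (PySem.List.len prices - 1) none
          = pvFoldAux r0 none rs := by
        have hb : PySem.List.len prices - 2 = ((rs.length : Nat) : Int) - 1 := by
          simp only [PySem.List.len_eq, hlen]; push_cast; ring
        have hs : PySem.List.len prices - 1 = ((rs.length : Nat) : Int) := by
          simp only [PySem.List.len_eq, hlen]; push_cast; ring
        have hsl : ((rs.length : Nat) : Int) < (prices.length : Int) := by omega
        rw [hb, hs, pvALoop_eq prices rs.length ((rs.length : Nat) : Int) none
              (by omega) (by positivity) hsl]
        have hget : prices.getD ((rs.length : Int)).toNat 0 = r0 := by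
          rw [hp]
          have : ((rs.length : Int)).toNat = rs.reverse.length := by simp
          rw [this]
          simp [List.getD]
        have htk : (prices.take rs.length).reverse = rs := by
          rw [hp]
          have : rs.length = rs.reverse.length := by simp
          rw [this, List.take_left]
          simp
        rw [hget, htk]
      rw [hA, pvFoldAux_eq_pvF]
      -- B side
      have hsmin : (r0 :: rs).foldl pvBStep [] = [r0] ++ pvScanMin r0 rs := by
        rw [List.foldl_cons]
        have h0 : pvBStep [] r0 = [r0] := by simp [pvBStep]
        rw [h0, pvBStep_fold rs [r0] r0 (by simp) (by simp [PySem.List.pyGetD_neg_one])]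
      show pvF none (pvGaps r0 rs) =
        (match PySem.List.min?
            (((r0 :: rs).tail.zip ((r0 :: rs).foldl pvBStep [])).map (fun pr => pr.2 - pr.1))
            (fun x => x) with
         | some m => if m ≤ 0 then some m else none
         | none => none)
      rw [hsmin]
      have hgaps : ((r0 :: rs).tail.zip ([r0] ++ pvScanMin r0 rs)).map (fun pr => pr.2 - pr.1)
          = pvGaps r0 rs := by
        simp [pvGaps]
      rw [hgaps, pvF_none_eq_min?]
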